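-- pv_equiv track=rewrite | github.com/stephanbreimann/Tools_Proteomics | proteomics_tools/retrievers/ret_ct_ref.py | dict_id_type
-- ===== SOURCE A (Python) =====
-- def dict_id_type(dict_type_ids=None):
--     """Get dict with separated major ids to significant up regulated cell type"""
--     # Save cell type for each id (excluding overlapping ids)
--     dict_id_type = {}
--     for ct_a in dict_type_ids:
--         list_ids_other_types = []
--         # Get list with all ids of other cell types
--         for ct_b in dict_type_ids:
--             if ct_b != ct_a:
--                 list_ids_other_types.extend(dict_type_ids[ct_b])
--         dict_id_type.update({i: ct_a for i in dict_type_ids[ct_a]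
--                              if i not in list_ids_other_types})
--     return dict_id_type
-- ===== SOURCE B (Python) =====
-- def dict_id_type(dict_type_ids=None):
--     """Get dict with separated major ids to significant up regulated cell type"""
--     # Count, for each id, how many cell types list it (each type counted once)
--     n_types = {}
--     for ids in dict_type_ids.values():
--         for i in dict.fromkeys(ids):
--             n_types[i] = n_types.get(i, 0) + 1
--     # One ordered pass keeping ids that occur in exactly one cell type
--     result = {}
--     for ct, ids in dict_type_ids.items():
--         for i in ids:
--             if n_types[i] == 1:
--                 result[i] = ct
--     return result
-- ===== Notes on version B (the rewrite author's own statement) =====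
-- stated objective: faster
-- what changed: A rebuilds the concatenated id list of all other cell types for every type (quadratic rescans); B builds one occurrence-count dict over all types in a single pass and then keeps, in one ordered pass, the ids counted exactly once.
import Mathlib
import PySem

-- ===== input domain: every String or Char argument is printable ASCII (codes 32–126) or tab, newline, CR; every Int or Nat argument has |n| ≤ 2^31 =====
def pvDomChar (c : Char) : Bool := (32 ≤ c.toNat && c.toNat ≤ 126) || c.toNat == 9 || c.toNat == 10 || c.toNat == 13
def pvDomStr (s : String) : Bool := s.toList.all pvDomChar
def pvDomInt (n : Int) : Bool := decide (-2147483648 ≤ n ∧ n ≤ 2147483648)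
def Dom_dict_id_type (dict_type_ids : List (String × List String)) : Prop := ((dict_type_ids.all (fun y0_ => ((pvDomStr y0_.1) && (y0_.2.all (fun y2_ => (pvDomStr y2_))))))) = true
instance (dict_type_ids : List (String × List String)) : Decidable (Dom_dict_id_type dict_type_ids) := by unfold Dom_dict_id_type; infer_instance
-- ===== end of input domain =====

-- B replaces A's quadratic per-type rescan of all other types by one occurrence-count
-- dict built in a single pass, then one ordered pass keeping ids counted exactly once (faster).


-- ===== PORT A =====
-- for ct_a in dict: build list of all ids of other types, then
-- dict_id_type.update({i: ct_a for i in dict[ct_a] if i not in list_ids_other_types}).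
-- The comprehension's keys (all mapped to ct_a) are inserted into the dict in list order,
-- so the update is ported as this conditional insert loop.
def dict_id_type (dict_type_ids : List (String × List String)) : List (String × String) :=
  (dict_type_ids.foldl
    (fun (d : PySem.Dict String String) ct_a =>
      let list_ids_other_types : List String :=
        dict_type_ids.foldl
          (fun acc ct_b =>
            if ct_b.1 ≠ ct_a.1 then
              acc ++ PySem.Dict.getD (PySem.Dict.mk dict_type_ids) ct_b.1 []
            else acc) []
      (PySem.Dict.getD (PySem.Dict.mk dict_type_ids) ct_a.1 []).foldl
        (fun d i => if i ∈ list_ids_other_types then d else d.insert i ct_a.1) d)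
    PySem.Dict.empty).items

-- ===== PORT B =====
def dict_id_type_alt (dict_type_ids : List (String × List String)) : List (String × String) :=
  -- n_types[i] = number of cell types whose id list contains i (dict.fromkeys = PySem.List.dedup)
  let n_types : PySem.Dict String Int :=
    dict_type_ids.foldl
      (fun n p => (PySem.List.dedup p.2).foldl (fun n i => n.insert i (n.getD i 0 + 1)) n)
      PySem.Dict.empty
  -- n_types[i] is always present here (i was counted); getD's default is never taken
  (dict_type_ids.foldl
    (fun (d : PySem.Dict String String) p =>
      p.2.foldl (fun d i => if n_types.getD i 0 = 1 then d.insert i p.1 else d) d)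
    PySem.Dict.empty).items

-- ===== PRECONDITION & SPEC =====
-- The association list stands for a Python dict, whose keys are necessarily distinct:
-- a list with duplicate keys represents no Python input, so it is excluded.
def Pre_dict_id_type (dict_type_ids : List (String × List String)) : Prop :=
  (dict_type_ids.map Prod.fst).Nodup
instance (dict_type_ids : List (String × List String)) : Decidable (Pre_dict_id_type dict_type_ids) := by unfold Pre_dict_id_type; infer_instance

def pvWitness_dict_id_type : (List (String × List String)) :=
  [("A", ["x", "y"]), ("B", ["y", "z"])]

def Spec_dict_id_type (dict_type_ids : List (String × List String)) (out : List (String × String)) : Prop := out = dict_id_type_alt dict_type_ids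
instance (dict_type_ids : List (String × List String)) (out : List (String × String)) : Decidable (Spec_dict_id_type dict_type_ids out) := by unfold Spec_dict_id_type; infer_instance

-- ===== CLAIM (what is proved, stated in full; the proofs are below) =====
def Claim_equal_dict_id_type : Prop := ∀ (dict_type_ids : List (String × List String)), Dom_dict_id_type dict_type_ids → Pre_dict_id_type dict_type_ids → Spec_dict_id_type dict_type_ids (dict_id_type dict_type_ids)

-- ===== LEMMAS AND PROOFS =====

-- dict lookup in the input dict returns the pair's own value (keys are distinct)
theorem pv_getD_self (l : List (String × List String)) (hnd : (l.map Prod.fst).Nodup)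
    (p : String × List String) (hp : p ∈ l) :
    PySem.Dict.getD (PySem.Dict.mk l) p.1 [] = p.2 := by
  apply PySem.Dict.getD_of_mem_items (d := PySem.Dict.mk l) (k := p.1) (v := p.2)
  · simpa [PySem.Dict.items] using hp
  · simpa [PySem.Dict.keys, PySem.Dict.items] using hnd

-- B's counting loop computes, for each id, the number of pairs whose list contains it
theorem pv_count_loop (l : List (String × List String)) (n : PySem.Dict String Int) (i : String) :
    (l.foldl (fun n p => (PySem.List.dedup p.2).foldl (fun n j => n.insert j (n.getD j 0 + 1)) n) n).getD i 0
      = n.getD i 0 + (l.countP (fun q => q.2.contains i) : Int) := by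
  induction l generalizing n with
  | nil => simp
  | cons p l ih =>
    rw [List.foldl_cons, ih, PySem.Dict.getD_foldl_insert_add_one, List.countP_cons]
    by_cases h : i ∈ p.2
    · rw [List.count_eq_one_of_mem (PySem.List.nodup_dedup p.2) (by simpa [PySem.List.mem_dedup])]
      simp only [List.contains_iff_mem, h, if_pos]
      push_cast
      ring
    · rw [List.count_eq_zero_of_not_mem (by simpa [PySem.List.mem_dedup])]
      simp [h]

-- membership in A's "all ids of other cell types" list (generalized over the loop state)
theorem pv_other_aux (l : List (String × List String)) (hnd : (l.map Prod.fst).Nodup)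
    (p : String × List String) (i : String) :
    ∀ (m : List (String × List String)), (∀ q ∈ m, q ∈ l) → ∀ acc : List String,
      (i ∈ m.foldl
          (fun acc ct_b => if ct_b.1 ≠ p.1 then acc ++ PySem.Dict.getD (PySem.Dict.mk l) ct_b.1 [] else acc) acc
        ↔ i ∈ acc ∨ ∃ q ∈ m, q.1 ≠ p.1 ∧ i ∈ q.2) := by
  intro m
  induction m with
  | nil => intro _ acc; simp
  | cons q m ih =>
    intro hsub acc
    rw [List.foldl_cons]
    have hq : q ∈ l := hsub q (List.mem_cons_self)
    have ihm := ih (fun r hr => hsub r (List.mem_cons_of_mem q hr))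
    by_cases hne : q.1 ≠ p.1
    · rw [if_pos hne, ihm, pv_getD_self l hnd q hq, List.mem_append]
      constructor
      · rintro (⟨ha | hb⟩ | ⟨r, hr, hrne, hir⟩)
        · exact Or.inl ha
        · exact Or.inr ⟨q, List.mem_cons_self, hne, hb⟩
        · exact Or.inr ⟨r, List.mem_cons_of_mem q hr, hrne, hir⟩
      · rintro (ha | ⟨r, hr, hrne, hir⟩)
        · exact Or.inl (Or.inl ha)
        · rcases List.mem_cons.1 hr with hEq | hr
          · exact Or.inl (Or.inr (hEq ▸ hir))
          · exact Or.inr ⟨r, hr, hrne, hir⟩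
    · rw [if_neg hne, ihm]
      constructor
      · rintro (ha | ⟨r, hr, hrne, hir⟩)
        · exact Or.inl ha
        · exact Or.inr ⟨r, List.mem_cons_of_mem q hr, hrne, hir⟩
      · rintro (ha | ⟨r, hr, hrne, hir⟩)
        · exact Or.inl ha
        · rcases List.mem_cons.1 hr with hEq | hr
          · exact absurd (hEq ▸ hrne) hne
          · exact Or.inr ⟨r, hr, hrne, hir⟩

theorem pv_other_mem (l : List (String × List String)) (hnd : (l.map Prod.fst).Nodup)
    (p : String × List String) (i : String) :
    (i ∈ l.foldl
        (fun acc ct_b => if ct_b.1 ≠ p.1 then acc ++ PySem.Dict.getD (PySem.Dict.mk l) ct_b.1 [] else acc) [])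
      ↔ ∃ q ∈ l, q.1 ≠ p.1 ∧ i ∈ q.2 := by
  simpa using pv_other_aux l hnd p i l (fun _ h => h) []

-- for an id of p's own list, "occurs in exactly one type" means "in no other type"
theorem pv_count_one_iff (l : List (String × List String)) (hnd : (l.map Prod.fst).Nodup)
    (p : String × List String) (hp : p ∈ l) (i : String) (hi : i ∈ p.2) :
    l.countP (fun q => q.2.contains i) = 1 ↔ ¬ ∃ q ∈ l, q.1 ≠ p.1 ∧ i ∈ q.2 := by
  obtain ⟨l₁, l₂, rfl⟩ := List.append_of_mem hp
  have hkey : ∀ q ∈ l₁ ++ l₂, q.1 ≠ p.1 := by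
    intro q hq hEq
    have hsplit := hnd
    rw [List.map_append, List.map_cons, List.nodup_append] at hsplit
    obtain ⟨n1, n2, hdisj⟩ := hsplit
    rcases List.mem_append.1 hq with h1 | h2
    · have hm : q.1 ∈ l₁.map Prod.fst := List.mem_map_of_mem h1
      rw [hEq] at hm
      exact hdisj p.1 hm p.1 List.mem_cons_self rfl
    · have hm : q.1 ∈ l₂.map Prod.fst := List.mem_map_of_mem h2
      rw [hEq] at hm
      exact (List.nodup_cons.1 n2).1 hm
  rw [List.countP_append, List.countP_cons]
  simp only [hi, List.contains_iff_mem, if_pos]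
  constructor
  · intro h hex
    obtain ⟨q, hq, hne, hiq⟩ := hex
    have h1 : l₁.countP (fun q => q.2.contains i) = 0 ∧ l₂.countP (fun q => q.2.contains i) = 0 := by
      omega
    rcases List.mem_append.1 hq with hq1 | hq2
    · have := List.countP_eq_zero.1 h1.1 q hq1
      simp [hiq] at this
    · rcases List.mem_cons.1 hq2 with hEq | hq2
      · exact hne (by rw [hEq])
      · have := List.countP_eq_zero.1 h1.2 q hq2
        simp [hiq] at this
  · intro h
    have h1 : l₁.countP (fun q => q.2.contains i) = 0 :=
      List.countP_eq_zero.2 (fun q hq => by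
        simp only [List.contains_iff_mem]
        exact fun hiq => h ⟨q, by simp [hq], hkey q (List.mem_append.2 (Or.inl hq)), hiq⟩)
    have h2 : l₂.countP (fun q => q.2.contains i) = 0 :=
      List.countP_eq_zero.2 (fun q hq => by
        simp only [List.contains_iff_mem]
        exact fun hiq => h ⟨q, by simp [hq], hkey q (List.mem_append.2 (Or.inr hq)), hiq⟩)
    omega

-- ===== VERDICT (by name: the statement is the Claim_ definition above) =====
theorem dict_id_type_spec : Claim_equal_dict_id_type := by
  intro l _hdom hnd
  unfold Spec_dict_id_type dict_id_type dict_id_type_alt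
  congr 1
  apply PySem.List.foldl_congr_mem'
  intro p hp d
  rw [pv_getD_self l hnd p hp]
  apply PySem.List.foldl_congr_mem'
  intro i hi acc
  rw [pv_count_loop l PySem.Dict.empty i]
  simp only [PySem.Dict.getD_empty, zero_add]
  have hmem := pv_other_mem l hnd p i
  have hone := pv_count_one_iff l hnd p hp i hi
  by_cases h : l.countP (fun q => q.2.contains i) = 1
  · rw [if_neg (by rw [hmem]; exact hone.1 h), if_pos (by exact_mod_cast h)]
  · rw [if_pos (by rw [hmem]; by_contra hno; exact h (hone.2 hno)),
      if_neg (by exact_mod_cast h)]
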